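-- pv_equiv track=rewrite | github.com/MrBrantCode/unitest_baseline | mut_generate/mist_train_cf/cf_77663/solution.py | is_symmetric_distribution
-- ===== SOURCE A (Python) =====
-- def is_symmetric_distribution(differences):
--     # Count the occurrences of each absolute difference
--     diff_counts = {}
--     for diff in differences:
--         key = abs(diff)
--         if key in diff_counts:
--             diff_counts[key] += 1
--         else:
--             diff_counts[key] = 1
--
--     # Check if the counts are the same for positive and negative differences
--     for key, count in diff_counts.items():
--         pos_count = sum(1 for diff in differences if diff == key)
--         neg_count = sum(1 for diff in differences if diff == -key)
--         if pos_count != neg_count: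
--             return False
--
--     return True
-- ===== SOURCE B (Python) =====
-- def is_symmetric_distribution(differences):
--     # Count each signed value once, then compare the +v and -v counts.
--     counts = {}
--     for d in differences:
--         counts[d] = counts.get(d, 0) + 1
--     return all(counts.get(-v, 0) == c for v, c in counts.items())
-- ===== Notes on version B (the rewrite author's own statement) =====
-- stated objective: alternative
-- what changed: Replace A's per-distinct-absolute-value rescans of the whole list by a single counting pass over the signed values followed by one dict lookup per distinct value.
import Mathlib
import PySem

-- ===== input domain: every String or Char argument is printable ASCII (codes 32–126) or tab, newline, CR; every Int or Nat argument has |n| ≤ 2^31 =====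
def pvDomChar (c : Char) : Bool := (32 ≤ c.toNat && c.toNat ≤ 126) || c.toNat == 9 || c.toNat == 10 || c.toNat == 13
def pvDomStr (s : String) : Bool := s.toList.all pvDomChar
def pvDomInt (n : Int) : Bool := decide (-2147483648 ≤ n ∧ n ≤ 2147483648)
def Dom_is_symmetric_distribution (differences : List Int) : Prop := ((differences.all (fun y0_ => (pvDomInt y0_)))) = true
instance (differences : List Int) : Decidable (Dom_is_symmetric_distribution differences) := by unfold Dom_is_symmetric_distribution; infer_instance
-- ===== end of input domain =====

-- B replaces A's per-key full-list rescans with one counting pass over the signed values (one dict lookup per distinct value instead of rescanning the list).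

-- ===== PORT A =====
-- second loop of A, with its early 'return False'
def isSymCheckA (differences : List Int) : List (Int × Int) → Bool
  | [] => true
  | (key, _count) :: rest =>
      let pos_count := differences.foldl (fun acc diff => if diff == key then acc + 1 else acc) (0 : Int)
      let neg_count := differences.foldl (fun acc diff => if diff == -key then acc + 1 else acc) (0 : Int)
      if pos_count ≠ neg_count then false else isSymCheckA differences rest

def is_symmetric_distribution (differences : List Int) : Bool :=
  let diff_counts := differences.foldl
    (fun d diff =>
      let key := |diff|
      if d.contains key then d.modify key 0 (· + 1) else d.insert key 1)
    PySem.Dict.empty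
  isSymCheckA differences diff_counts.items

-- ===== PORT B =====
def is_symmetric_distribution_alt (differences : List Int) : Bool :=
  let counts := differences.foldl (fun d x => d.insert x (d.getD x 0 + 1))
    (PySem.Dict.empty : PySem.Dict Int Int)
  counts.items.all (fun vc => counts.getD (-vc.1) 0 == vc.2)

-- ===== PRECONDITION & SPEC =====
def Spec_is_symmetric_distribution (differences : List Int) (out : Bool) : Prop := out = is_symmetric_distribution_alt differences
instance (differences : List Int) (out : Bool) : Decidable (Spec_is_symmetric_distribution differences out) := by unfold Spec_is_symmetric_distribution; infer_instance

-- ===== CLAIM (what is proved, stated in full; the proofs are below) =====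
def Claim_equal_is_symmetric_distribution : Prop := ∀ (differences : List Int), Dom_is_symmetric_distribution differences → Spec_is_symmetric_distribution differences (is_symmetric_distribution differences)

-- ===== LEMMAS AND PROOFS =====

theorem buildA_gen (xs : List Int) : ∀ (d : PySem.Dict Int Int),
    xs.foldl
      (fun d diff =>
        let key := |diff|
        if d.contains key then d.modify key 0 (· + 1) else d.insert key 1)
      d
    = (xs.map (fun v => |v|)).foldl (fun d x => d.modify x 0 (· + 1)) d := by
  induction xs with
  | nil => intro d; rfl
  | cons x rest ih =>
    intro d
    have step :
        (if d.contains |x| then d.modify |x| 0 (· + 1) else d.insert |x| 1)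
          = d.modify |x| 0 (· + 1) := by
      by_cases h : d.contains |x| = true
      · simp [h]
      · have h' : d.contains |x| = false := by simpa using h
        have hg : d.getD |x| 0 = 0 := by
          simp [PySem.Dict.getD_of_not_contains, h']
        simp [h', PySem.Dict.modify, hg]
    simp only [List.foldl_cons, List.map_cons]
    rw [step]
    exact ih _

-- A's build loop is the standard counter over the absolute values
theorem buildA_eq_counter (xs : List Int) :
    xs.foldl
      (fun d diff =>
        let key := |diff|
        if d.contains key then d.modify key 0 (· + 1) else d.insert key 1)
      PySem.Dict.empty
    = PySem.Dict.counter (xs.map (fun v => |v|)) := by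
  rw [PySem.Dict.counter_eq_foldl]
  exact buildA_gen xs _

theorem isSymCheckA_eq_all (xs : List Int) (l : List (Int × Int)) :
    isSymCheckA xs l = l.all (fun p => ((xs.count p.1 : Int)) == ((xs.count (-p.1) : Int))) := by
  induction l with
  | nil => rfl
  | cons p rest ih =>
    obtain ⟨k, c⟩ := p
    simp only [isSymCheckA, PySem.List.foldl_beq_add_one, zero_add, List.all_cons, ih]
    by_cases h : (xs.count k : Int) = (xs.count (-k) : Int)
    · simp [h]
    · simp [h]

-- both sides reduce to: every value present occurs as often as its negation
theorem main_bridge (xs : List Int) :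
    ((PySem.Set.ofList (xs.map (fun v => |v|))).all
        (fun k => ((xs.count k : Int)) == ((xs.count (-k) : Int))))
    = ((PySem.Set.ofList xs).all
        (fun v => ((xs.count (-v) : Int)) == ((xs.count v : Int)))) := by
  have key : (∀ v ∈ xs, xs.count v = xs.count (-v)) ↔
      (∀ v ∈ xs, xs.count (-v) = xs.count v) := by
    constructor <;> (intro h v hv; exact (h v hv).symm)
  rcases Bool.eq_false_or_eq_true ((PySem.Set.ofList xs).all
      (fun v => ((xs.count (-v) : Int)) == ((xs.count v : Int)))) with hB | hB <;> rw [hB]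
  case inr => -- RHS false: some v ∈ xs with count(-v) ≠ count v; then |v| refutes LHS
    rw [List.all_eq_false] at hB
    obtain ⟨v, hv, hne⟩ := hB
    rw [PySem.Set.mem_ofList] at hv
    have hne' : xs.count (-v) ≠ xs.count v := by
      intro h; apply hne; simp [h]
    rw [List.all_eq_false]
    refine ⟨|v|, ?_, ?_⟩
    · rw [PySem.Set.mem_ofList]; exact List.mem_map_of_mem hv
    · rcases abs_cases v with ⟨h1, _⟩ | ⟨h1, _⟩ <;>
        · rw [h1]
          simp only [beq_iff_eq, Nat.cast_inj]
          first
          | exact fun h => hne' h.symm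
          | simpa [neg_neg] using hne'
  case inl => -- RHS true: all counts symmetric; LHS follows
    rw [List.all_eq_true] at hB ⊢
    intro k hk
    rw [PySem.Set.mem_ofList, List.mem_map] at hk
    obtain ⟨v, hv, rfl⟩ := hk
    have := hB v (by rw [PySem.Set.mem_ofList]; exact hv)
    simp only [beq_iff_eq, Nat.cast_inj] at this ⊢
    rcases abs_cases v with ⟨h1, _⟩ | ⟨h1, _⟩ <;> rw [h1]
    · exact this.symm
    · simpa [neg_neg] using this

theorem altB_eq (xs : List Int) :
    is_symmetric_distribution_alt xs
      = ((PySem.Set.ofList xs).all fun v => ((xs.count (-v) : Int)) == ((xs.count v : Int))) := by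
  have hc : (List.foldl (fun (d : PySem.Dict Int Int) x => d.insert x (d.getD x 0 + 1))
      PySem.Dict.empty xs) = PySem.Dict.counter xs :=
    PySem.Dict.foldl_insert_getD_add_one_eq_counter xs
  have h1 : is_symmetric_distribution_alt xs
      = (fun d : PySem.Dict Int Int => d.items.all fun vc => d.getD (-vc.1) 0 == vc.2)
          (PySem.Dict.counter xs) := by
    unfold is_symmetric_distribution_alt
    exact congrArg (fun d : PySem.Dict Int Int => d.items.all fun vc => d.getD (-vc.1) 0 == vc.2) hc
  rw [h1]
  simp only [PySem.Dict.items_counter, List.all_map, Function.comp_def, PySem.Dict.getD_counter]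

theorem A_eq_B (xs : List Int) :
    is_symmetric_distribution xs = is_symmetric_distribution_alt xs := by
  simp only [is_symmetric_distribution]
  rw [buildA_eq_counter, isSymCheckA_eq_all, PySem.Dict.items_counter, altB_eq]
  simp only [List.all_map]
  exact main_bridge xs

-- ===== VERDICT (by name: the statement is the Claim_ definition above) =====
theorem is_symmetric_distribution_spec : Claim_equal_is_symmetric_distribution := by
  intro xs _
  exact A_eq_B xs
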